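-- pv_equiv track=rewrite | github.com/paulyeo21/prep | problems/message_mess.py | restore
-- ===== SOURCE A (Python) =====
-- def restore(dictionary, message):
--     d = {}
--     max_length = 0
--     for word in dictionary:
--         d[word] = True
--         if len(word) > max_length:
--             max_length = len(word)
--
--     output = []
--     for i in range(len(message)):
--         for j in range(i + 1, i + max_length + 1):
--             if j <= len(message):
--                 if message[i:j] in d:
--                     output.append(message[i:j])
--     return " ".join(output)
-- ===== SOURCE B (Python) =====
-- def restore(dictionary, message):
--     matches = []
--     for w in dict.fromkeys(dictionary):
--         if w:
--             i = message.find(w)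
--             while i != -1:
--                 matches.append((i, i + len(w)))
--                 i = message.find(w, i + 1)
--     matches.sort()
--     return " ".join(message[i:j] for i, j in matches)
-- ===== Notes on version B (the rewrite author's own statement) =====
-- stated objective: alternative
-- what changed: A scans every start position and probes each candidate end position's substring against a dict of words; B instead locates all occurrences of each distinct dictionary word with repeated str.find, then sorts the collected (start, end) matches lexicographically and joins the slices.
import Mathlib
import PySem

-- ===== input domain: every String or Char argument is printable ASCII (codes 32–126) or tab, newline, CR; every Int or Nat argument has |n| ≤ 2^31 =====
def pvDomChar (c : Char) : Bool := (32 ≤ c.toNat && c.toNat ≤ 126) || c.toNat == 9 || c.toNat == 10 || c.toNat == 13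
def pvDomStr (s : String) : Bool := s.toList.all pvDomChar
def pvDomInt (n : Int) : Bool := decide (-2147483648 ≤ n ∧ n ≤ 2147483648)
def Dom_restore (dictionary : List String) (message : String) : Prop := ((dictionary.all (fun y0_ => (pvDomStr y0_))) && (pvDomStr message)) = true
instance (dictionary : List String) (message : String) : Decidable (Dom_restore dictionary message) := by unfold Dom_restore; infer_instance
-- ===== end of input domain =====

-- B re-implements the position-by-position substring scan of A as word-centric matching:
-- it locates every occurrence of each distinct dictionary word, sorts the matches by
-- (start, end) and joins the slices (alternative decomposition; equal output proved).


-- ===== PORT A =====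
def restore (dictionary : List String) (message : String) : String :=
  let st := dictionary.foldl (fun (st : PySem.Dict String Bool × Int) word =>
      (st.1.insert word true,
       if PySem.Str.len word > st.2 then PySem.Str.len word else st.2))
      (PySem.Dict.empty, 0)
  let d := st.1
  let max_length := st.2
  let output := (PySem.List.pyRange 0 (PySem.Str.len message) 1).foldl (fun output i =>
      (PySem.List.pyRange (i + 1) (i + max_length + 1) 1).foldl (fun output j =>
        if j ≤ PySem.Str.len message then
          if d.contains (PySem.Str.slice message (some i) (some j)) then
            output ++ [PySem.Str.slice message (some i) (some j)]
          else output
        else output) output) []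
  PySem.Str.join " " output

-- ===== PORT B =====
-- bounds of a successful str.find(w, start): the hit is at or after start and inside the string
theorem pv_findFrom_bounds (message w : String) (start : Int) (h0 : 0 ≤ start)
    (h1 : start ≤ PySem.Str.len message) (hne : PySem.Str.findFrom message w start ≠ -1) :
    start ≤ PySem.Str.findFrom message w start ∧
      PySem.Str.findFrom message w start ≤ PySem.Str.len message := by
  have hk : start.toNat ≤ message.toList.length := by
    rw [PySem.Str.len_eq] at h1; omega
  have hcast : ((start.toNat : Nat) : Int) = start := Int.toNat_of_nonneg h0
  have heq : PySem.Str.findFrom message w start =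
      (if PySem.Chars.find (message.toList.drop start.toNat) w.toList = -1 then -1
       else (start.toNat : Int) + PySem.Chars.find (message.toList.drop start.toNat) w.toList) := by
    rw [PySem.Str.findFrom_eq, ← hcast]
    exact PySem.Chars.findFrom_natCast message.toList w.toList start.toNat hk
  rw [heq] at hne ⊢
  split at hne
  · exact absurd rfl hne
  · rename_i hf
    have hge := PySem.Chars.neg_one_le_find (message.toList.drop start.toNat) w.toList
    have hle := PySem.Chars.find_le_length (message.toList.drop start.toNat) w.toList
    rw [List.length_drop] at hle
    rw [if_neg hf, PySem.Str.len_eq]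
    omega

-- the while loop 'i = message.find(w, …); while i != -1: append; i = message.find(w, i+1)'
-- (the range guard only makes the recursion total; it holds at every call the port makes)
def restoreFind (message w : String) (start : Int) : List (Int × Int) :=
  if h0 : 0 ≤ start ∧ start ≤ PySem.Str.len message then
    let i := PySem.Str.findFrom message w start
    if h : i = -1 then []
    else (i, i + PySem.Str.len w) :: restoreFind message w (i + 1)
  else []
termination_by (PySem.Str.len message + 1 - start).toNat
decreasing_by
  have hb := pv_findFrom_bounds message w start h0.1 h0.2 h
  omega

def restore_alt (dictionary : List String) (message : String) : String :=
  let mtchs : List (Int × Int) :=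
    (PySem.List.dedup dictionary).foldl (fun acc w =>
      if w == "" then acc
      else acc ++ restoreFind message w 0) []
  let ms := PySem.List.sorted2 mtchs (fun p => p.1) (fun p => p.2)
  PySem.Str.join " " (ms.map (fun p => PySem.Str.slice message (some p.1) (some p.2)))

-- ===== PRECONDITION & SPEC =====
def Spec_restore (dictionary : List String) (message : String) (out : String) : Prop := out = restore_alt dictionary message
instance (dictionary : List String) (message : String) (out : String) : Decidable (Spec_restore dictionary message out) := by unfold Spec_restore; infer_instance

-- ===== CLAIM (what is proved, stated in full; the proofs are below) =====
def Claim_equal_restore : Prop := ∀ (dictionary : List String) (message : String), Dom_restore dictionary message → Spec_restore dictionary message (restore dictionary message)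

-- ===== LEMMAS AND PROOFS =====

-- abbreviations for the two match lists (proof helpers only)
def pvMaxL (dictionary : List String) : Int :=
  dictionary.foldl (fun m w => if PySem.Str.len w > m then PySem.Str.len w else m) 0

def pvP (dictionary : List String) (message : String) (i j : Int) : Bool :=
  decide (j ≤ PySem.Str.len message) && decide (PySem.Str.slice message (some i) (some j) ∈ dictionary)

-- all of A's matches as (start, end) pairs, in A's emission order
def pvC (dictionary : List String) (message : String) : List (Int × Int) :=
  (PySem.List.pyRange 0 (PySem.Str.len message) 1).flatMap (fun i =>
    ((PySem.List.pyRange (i + 1) (i + pvMaxL dictionary + 1) 1).filter (pvP dictionary message i)).map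
      (fun j => (i, j)))

def pvQ (message : String) (w : String) (i : Int) : Bool :=
  PySem.Chars.startswith (message.toList.drop i.toNat) w.toList

def pvBlock (message : String) (w : String) : List (Int × Int) :=
  if w = "" then []
  else ((PySem.List.pyRange 0 (PySem.Str.len message - PySem.Str.len w + 1) 1).filter (pvQ message w)).map
    (fun i => (i, i + PySem.Str.len w))

-- all of B's matches, in B's pre-sort order
def pvM (dictionary : List String) (message : String) : List (Int × Int) :=
  (PySem.List.dedup dictionary).flatMap (pvBlock message)

-- the lexicographic order on (start, end) pairs that both Python's tuple sort and A's loop order realise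
def pvR (a b : Int × Int) : Prop := a.1 < b.1 ∨ (a.1 = b.1 ∧ a.2 < b.2)

def pvLt (a b : Int × Int) : Bool := decide (a.1 < b.1) || (!decide (b.1 < a.1) && decide (a.2 < b.2))

theorem pvLt_iff (a b : Int × Int) : pvLt a b = true ↔ pvR a b := by
  simp [pvLt, pvR]; omega

-- A's max_length fold is a running maximum: nonnegative and at least every word length.
theorem pv_maxfold (dictionary : List String) :
    (0 : Int) ≤ pvMaxL dictionary ∧ ∀ w ∈ dictionary, PySem.Str.len w ≤ pvMaxL dictionary := by
  have h : (fun (m : Int) (w : String) => if PySem.Str.len w > m then PySem.Str.len w else m)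
      = (fun (m : Int) (w : String) => max m (PySem.Str.len w)) := by
    funext m w; rw [max_def_lt]
  unfold pvMaxL
  rw [h]
  have := PySem.List.le_foldl_max (dictionary.map PySem.Str.len) (0 : Int)
  rw [List.foldl_map] at this
  exact ⟨this.1, fun w hw => this.2 _ (List.mem_map_of_mem hw)⟩

-- an in-range slice message[i:j] (0 ≤ i < j ≤ len) has length j - i
theorem pv_len_slice (message : String) (i j : Int) (h0 : 0 ≤ i) (hij : i < j)
    (hj : j ≤ PySem.Str.len message) :
    PySem.Str.len (PySem.Str.slice message (some i) (some j)) = j - i := by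
  rw [PySem.Str.len_eq, PySem.Str.toList_slice, PySem.Chars.slice_eq_listSlice,
      PySem.List.slice_toNat _ h0 (by omega)]
  rw [PySem.Str.len_eq] at hj
  rw [List.length_take, List.length_drop]
  have h1 : i.toNat ≤ j.toNat := by omega
  have h2 : j.toNat ≤ message.toList.length := by omega
  omega

-- characterisation of an in-range slice equalling a word
theorem pv_slice_eq_iff (message w : String) (i j : Int) (h0 : 0 ≤ i) (hij : i < j)
    (hj : j ≤ PySem.Str.len message) :
    PySem.Str.slice message (some i) (some j) = w ↔
      (w.toList <+: message.toList.drop i.toNat ∧ PySem.Str.len w = j - i) := by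
  have hS : (PySem.Str.slice message (some i) (some j)).toList
      = (message.toList.drop i.toNat).take (j.toNat - i.toNat) := by
    rw [PySem.Str.toList_slice, PySem.Chars.slice_eq_listSlice, PySem.List.slice_toNat _ h0 (by omega)]
  constructor
  · intro h
    refine ⟨?_, by rw [← h]; exact pv_len_slice message i j h0 hij hj⟩
    rw [← h, hS]
    exact List.take_prefix _ _
  · rintro ⟨hpre, hlen⟩
    have hw : w.toList = (message.toList.drop i.toNat).take w.toList.length :=
      List.prefix_iff_eq_take.mp hpre
    have hlen' : w.toList.length = j.toNat - i.toNat := by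
      rw [PySem.Str.len_eq] at hlen; omega
    apply String.ext
    rw [hS, hw, hlen']

-- generic facts about PySem's insertion sort
theorem pv_insertBy_perm {α : Type} (bf : α → α → Bool) (x : α) (ys : List α) :
    (PySem.List.insertBy bf x ys).Perm (x :: ys) := by
  induction ys with
  | nil => simp [PySem.List.insertBy]
  | cons y ys ih =>
    rw [show PySem.List.insertBy bf x (y :: ys)
        = if bf x y then x :: y :: ys else y :: PySem.List.insertBy bf x ys from by
      simp [PySem.List.insertBy]]
    split
    · exact List.Perm.refl _
    · exact (ih.cons y).trans (List.Perm.swap x y ys)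

theorem pv_insertBy_pairwise {α : Type} (bf : α → α → Bool)
    (htrans : ∀ a b c, bf a b = true → bf b c = true → bf a c = true)
    (x : α) (ys : List α) (hpw : ys.Pairwise (fun a b => bf a b = true))
    (htot : ∀ y ∈ ys, bf x y = true ∨ bf y x = true) :
    (PySem.List.insertBy bf x ys).Pairwise (fun a b => bf a b = true) := by
  induction ys with
  | nil => simp [PySem.List.insertBy]
  | cons y ys ih =>
    rw [show PySem.List.insertBy bf x (y :: ys)
        = if bf x y then x :: y :: ys else y :: PySem.List.insertBy bf x ys from by
      simp [PySem.List.insertBy]]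
    rcases List.pairwise_cons.mp hpw with ⟨hy, hys⟩
    split
    · rename_i hxy
      exact List.pairwise_cons.mpr ⟨by
        intro z hz
        rcases List.mem_cons.mp hz with rfl | hz
        · exact hxy
        · exact htrans x y z hxy (hy z hz), hpw⟩
    · rename_i hxy
      refine List.pairwise_cons.mpr ⟨?_, ih hys (fun z hz => htot z (List.mem_cons_of_mem y hz))⟩
      intro z hz
      rcases (PySem.List.mem_insertBy bf x z ys).mp hz with hzx | hz
      · subst hzx
        rcases htot y (List.mem_cons_self) with h | h
        · exact absurd h (by simpa using hxy)
        · exact h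
      · exact hy z hz

theorem pv_foldl_insertBy_perm {α : Type} (bf : α → α → Bool) (xs acc : List α) :
    (xs.foldl (fun a x => PySem.List.insertBy bf x a) acc).Perm (acc ++ xs) := by
  induction xs generalizing acc with
  | nil => simp
  | cons x xs ih =>
    simp only [List.foldl_cons]
    refine (ih (PySem.List.insertBy bf x acc)).trans ?_
    have h1 : (PySem.List.insertBy bf x acc ++ xs).Perm ((x :: acc) ++ xs) :=
      (pv_insertBy_perm bf x acc).append_right xs
    refine h1.trans ?_
    simpa using (List.perm_middle).symm

theorem pv_foldl_insertBy_pairwise {α : Type} (bf : α → α → Bool)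
    (htrans : ∀ a b c, bf a b = true → bf b c = true → bf a c = true)
    (htricho : ∀ a b, a ≠ b → bf a b = true ∨ bf b a = true)
    (xs acc : List α) (hpw : acc.Pairwise (fun a b => bf a b = true))
    (hnd : (acc ++ xs).Nodup) :
    (xs.foldl (fun a x => PySem.List.insertBy bf x a) acc).Pairwise (fun a b => bf a b = true) := by
  induction xs generalizing acc with
  | nil => simpa using hpw
  | cons x xs ih =>
    simp only [List.foldl_cons]
    have hxacc : x ∉ acc := by
      intro hmem
      exact (List.disjoint_of_nodup_append hnd) hmem (List.mem_cons_self)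
    have hpw' := pv_insertBy_pairwise bf htrans x acc hpw
      (fun y hy => (htricho x y (fun he => hxacc (he ▸ hy))))
    refine ih (PySem.List.insertBy bf x acc) hpw' ?_
    have hperm : (PySem.List.insertBy bf x acc ++ xs).Perm (acc ++ x :: xs) :=
      ((pv_insertBy_perm bf x acc).append_right xs).trans (List.perm_middle.symm)
    exact (hperm.nodup_iff).mpr hnd

-- sorted2 of a duplicate-free list is its unique strictly-lex-increasing rearrangement
theorem pv_sorted2_eq (xs ys : List (Int × Int)) (hnd : xs.Nodup) (hperm : ys.Perm xs)
    (hpw : ys.Pairwise pvR) :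
    PySem.List.sorted2 xs (fun p => p.1) (fun p => p.2) = ys := by
  have htrans : ∀ a b c : Int × Int, pvLt a b = true → pvLt b c = true → pvLt a c = true := by
    intro a b c hab hbc
    rw [pvLt_iff] at *
    unfold pvR at *
    omega
  have htricho : ∀ a b : Int × Int, a ≠ b → pvLt a b = true ∨ pvLt b a = true := by
    intro a b hne
    have hne' : ¬(a.1 = b.1 ∧ a.2 = b.2) := by
      intro ⟨h1, h2⟩
      exact hne (Prod.ext_iff.mpr ⟨h1, h2⟩)
    rw [pvLt_iff, pvLt_iff]
    unfold pvR
    omega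
  have e : PySem.List.sorted2 xs (fun p => p.1) (fun p => p.2)
      = xs.foldl (fun a x => PySem.List.insertBy pvLt x a) [] := rfl
  rw [e]
  have hLperm : (xs.foldl (fun a x => PySem.List.insertBy pvLt x a) []).Perm ys :=
    (pv_foldl_insertBy_perm pvLt xs []).trans hperm.symm
  have hLpw : (xs.foldl (fun a x => PySem.List.insertBy pvLt x a) []).Pairwise (fun a b => pvLt a b = true) :=
    pv_foldl_insertBy_pairwise pvLt htrans htricho xs [] (List.Pairwise.nil) (by simpa using hnd)
  have hypw : ys.Pairwise (fun a b => pvLt a b = true) :=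
    hpw.imp (fun h => (pvLt_iff _ _).mpr h)
  refine List.Perm.eq_of_pairwise ?_ hLpw hypw hLperm
  intro a b _ _ hab hba
  rw [pvLt_iff] at hab hba
  unfold pvR at hab hba
  exfalso
  omega

theorem pv_ite_and (c1 c2 : Prop) [Decidable c1] [Decidable c2] {α : Type} (x y : α) :
    (if c1 then if c2 then x else y else y) = if c1 ∧ c2 then x else y := by
  split_ifs <;> tauto

-- membership in A's match list
theorem pv_mem_C (dictionary : List String) (message : String) (i j : Int) :
    (i, j) ∈ pvC dictionary message ↔
      0 ≤ i ∧ i < PySem.Str.len message ∧ i < j ∧ j ≤ i + pvMaxL dictionary ∧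
      pvP dictionary message i j = true := by
  unfold pvC
  simp only [List.mem_flatMap, List.mem_map, List.mem_filter, PySem.List.mem_pyRange_one,
    Prod.mk.injEq]
  constructor
  · rintro ⟨i', ⟨h0, h1⟩, j', ⟨⟨h2, h3⟩, hp⟩, rfl, rfl⟩
    exact ⟨h0, h1, by omega, by omega, hp⟩
  · rintro ⟨h0, h1, h2, h3, hp⟩
    exact ⟨i, ⟨h0, h1⟩, j, ⟨⟨by omega, by omega⟩, hp⟩, rfl, rfl⟩

-- membership in B's match list
theorem pv_mem_M (dictionary : List String) (message : String) (i j : Int) :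
    (i, j) ∈ pvM dictionary message ↔
      ∃ w ∈ dictionary, w ≠ "" ∧ 0 ≤ i ∧ i < PySem.Str.len message - PySem.Str.len w + 1 ∧
        pvQ message w i = true ∧ j = i + PySem.Str.len w := by
  unfold pvM pvBlock
  simp only [List.mem_flatMap, PySem.List.mem_dedup]
  constructor
  · rintro ⟨w, hw, hmem⟩
    split at hmem
    · simp at hmem
    · rename_i hne
      simp only [List.mem_map, List.mem_filter, PySem.List.mem_pyRange_one, Prod.mk.injEq] at hmem
      rcases hmem with ⟨i', ⟨⟨h0, h1⟩, hq⟩, rfl, rfl⟩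
      exact ⟨w, hw, hne, h0, h1, hq, rfl⟩
  · rintro ⟨w, hw, hne, h0, h1, hq, rfl⟩
    refine ⟨w, hw, ?_⟩
    rw [if_neg hne]
    simp only [List.mem_map, List.mem_filter, PySem.List.mem_pyRange_one, Prod.mk.injEq]
    exact ⟨i, ⟨⟨h0, h1⟩, hq⟩, rfl, rfl⟩

-- the two match lists have the same members
theorem pv_mem_iff (dictionary : List String) (message : String) (p : Int × Int) :
    p ∈ pvM dictionary message ↔ p ∈ pvC dictionary message := by
  obtain ⟨i, j⟩ := p
  rw [pv_mem_M, pv_mem_C]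
  constructor
  · rintro ⟨w, hw, hne, h0, h1, hq, rfl⟩
    have hwlen : 0 < PySem.Str.len w := by
      rw [PySem.Str.len_eq]
      have : w.toList ≠ [] := fun hc => hne (String.ext (by simpa using hc))
      have := List.length_pos_of_ne_nil this
      omega
    have hj : i + PySem.Str.len w ≤ PySem.Str.len message := by omega
    have hslice : PySem.Str.slice message (some i) (some (i + PySem.Str.len w)) = w :=
      (pv_slice_eq_iff message w i (i + PySem.Str.len w) h0 (by omega) hj).mpr
        ⟨(PySem.Chars.startswith_iff _ _).mp hq, by omega⟩
    refine ⟨h0, by omega, by omega, ?_, ?_⟩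
    · have := (pv_maxfold dictionary).2 w hw
      omega
    · unfold pvP
      simp only [Bool.and_eq_true, decide_eq_true_eq]
      refine ⟨hj, ?_⟩
      rw [hslice]
      exact hw
  · rintro ⟨h0, h1, h2, h3, hp⟩
    unfold pvP at hp
    simp only [Bool.and_eq_true, decide_eq_true_eq] at hp
    obtain ⟨hj, hmem⟩ := hp
    set w := PySem.Str.slice message (some i) (some j) with hw
    have hlen : PySem.Str.len w = j - i := pv_len_slice message i j h0 h2 hj
    have hpre : w.toList <+: message.toList.drop i.toNat ∧ PySem.Str.len w = j - i :=
      (pv_slice_eq_iff message w i j h0 h2 hj).mp rfl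
    refine ⟨w, hmem, ?_, h0, by omega, ?_, by omega⟩
    · intro hc
      rw [hc, PySem.Str.len_eq] at hlen
      simp at hlen
      omega
    · exact (PySem.Chars.startswith_iff _ _).mpr hpre.1

theorem pv_pairwise_C (dictionary : List String) (message : String) :
    (pvC dictionary message).Pairwise pvR := by
  unfold pvC
  rw [List.pairwise_flatMap]
  constructor
  · intro i _
    refine List.Pairwise.map _ (fun a b (h : a < b) => Or.inr ⟨rfl, h⟩) ?_
    exact (PySem.List.pairwise_lt_pyRange_one _ _).filter _
  · refine (PySem.List.pairwise_lt_pyRange_one _ _).imp ?_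
    intro i i' hlt x hx y hy
    rcases List.mem_map.mp hx with ⟨a, _, rfl⟩
    rcases List.mem_map.mp hy with ⟨b, _, rfl⟩
    exact Or.inl hlt

theorem pv_nodup_C (dictionary : List String) (message : String) :
    (pvC dictionary message).Nodup := by
  have h := pv_pairwise_C dictionary message
  exact h.imp (fun {a b} hr => by
    rintro rfl
    unfold pvR at hr
    omega)

-- a pair in w's block is a match of w: its slice is w
theorem pv_block_slice (message w : String) (p : Int × Int) (hp : p ∈ pvBlock message w) :
    PySem.Str.slice message (some p.1) (some p.2) = w := by
  unfold pvBlock at hp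
  split at hp
  · simp at hp
  · rename_i hne
    simp only [List.mem_map, List.mem_filter, PySem.List.mem_pyRange_one] at hp
    rcases hp with ⟨i, ⟨⟨h0, h1⟩, hq⟩, rfl⟩
    have hwlen : 0 < PySem.Str.len w := by
      rw [PySem.Str.len_eq]
      have : w.toList ≠ [] := fun hc => hne (String.ext (by simpa using hc))
      have := List.length_pos_of_ne_nil this
      omega
    exact (pv_slice_eq_iff message w i (i + PySem.Str.len w) h0 (by omega) (by omega)).mpr
      ⟨(PySem.Chars.startswith_iff _ _).mp hq, by omega⟩

theorem pv_nodup_M (dictionary : List String) (message : String) :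
    (pvM dictionary message).Nodup := by
  unfold pvM
  rw [List.nodup_flatMap]
  constructor
  · intro w _
    unfold pvBlock
    split
    · exact List.nodup_nil
    · refine List.Nodup.map ?_ (((PySem.List.nodup_pyRange_one _ _)).filter _)
      intro a b hab
      exact congrArg Prod.fst hab
  · refine (PySem.List.nodup_dedup dictionary).imp ?_
    intro w w' hne p hp hp'
    exact hne ((pv_block_slice message w p hp).symm.trans (pv_block_slice message w' p hp'))

-- A's nested loops produce exactly the slices of pvC, in order
theorem pv_A_list (dictionary : List String) (message : String) :
    ((PySem.List.pyRange 0 (PySem.Str.len message) 1).foldl (fun output i =>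
      (PySem.List.pyRange (i + 1) (i + pvMaxL dictionary + 1) 1).foldl (fun output j =>
        if j ≤ PySem.Str.len message then
          if (dictionary.foldl (fun (d : PySem.Dict String Bool) word => d.insert word true) PySem.Dict.empty).contains
              (PySem.Str.slice message (some i) (some j)) then
            output ++ [PySem.Str.slice message (some i) (some j)]
          else output
        else output) output) [])
    = (pvC dictionary message).map (fun p => PySem.Str.slice message (some p.1) (some p.2)) := by
  have hc : ∀ s, (dictionary.foldl (fun (d : PySem.Dict String Bool) word => d.insert word true) PySem.Dict.empty).contains s
      = decide (s ∈ dictionary) := by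
    intro s
    rw [Bool.eq_iff_iff, PySem.Dict.contains_iff_mem_keys, PySem.Dict.keys_foldl_insert]
    simp [PySem.Set.mem_update, PySem.Dict.keys_empty]
  have hinner : ∀ (i : Int) (acc : List String),
      (PySem.List.pyRange (i + 1) (i + pvMaxL dictionary + 1) 1).foldl (fun output j =>
        if j ≤ PySem.Str.len message then
          if (dictionary.foldl (fun (d : PySem.Dict String Bool) word => d.insert word true) PySem.Dict.empty).contains
              (PySem.Str.slice message (some i) (some j)) then
            output ++ [PySem.Str.slice message (some i) (some j)]
          else output
        else output) acc
      = acc ++ ((PySem.List.pyRange (i + 1) (i + pvMaxL dictionary + 1) 1).filter (pvP dictionary message i)).map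
          (fun j => PySem.Str.slice message (some i) (some j)) := by
    intro i acc
    have hA : ∀ (acc' : List String) (j : Int),
        (if j ≤ PySem.Str.len message then
          if (dictionary.foldl (fun (d : PySem.Dict String Bool) word => d.insert word true) PySem.Dict.empty).contains
              (PySem.Str.slice message (some i) (some j)) then
            acc' ++ [PySem.Str.slice message (some i) (some j)]
          else acc'
        else acc')
        = (if pvP dictionary message i j then acc' ++ [PySem.Str.slice message (some i) (some j)] else acc') := by
      intro acc' j
      rw [pv_ite_and]
      exact if_congr (by simp [pvP, hc]) rfl rfl
    rw [PySem.List.foldl_congr_mem _ _ _ acc (fun a x _ => hA a x)]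
    exact PySem.List.foldl_append_if (pvP dictionary message i) _ _ acc
  rw [PySem.List.foldl_congr_mem _ _ _ [] (fun acc i _ => hinner i acc)]
  rw [PySem.List.foldl_append_eq_flatMap]
  unfold pvC
  rw [List.map_flatMap]
  simp only [List.map_map]
  rfl

-- the find-loop collects exactly the occurrence starts from 'start' on, in increasing order
theorem pv_restoreFind (message w : String) (hw : w ≠ "") :
    ∀ (start : Int), 0 ≤ start → start ≤ PySem.Str.len message →
    restoreFind message w start
      = ((PySem.List.pyRange start (PySem.Str.len message - PySem.Str.len w + 1) 1).filter
          (pvQ message w)).map (fun i => (i, i + PySem.Str.len w)) := by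
  have hwlen : 0 < PySem.Str.len w := by
    rw [PySem.Str.len_eq]
    have : w.toList ≠ [] := fun hc => hw (String.ext (by simpa using hc))
    have := List.length_pos_of_ne_nil this
    omega
  suffices H : ∀ (m : Nat) (start : Int), (PySem.Str.len message + 1 - start).toNat ≤ m →
      0 ≤ start → start ≤ PySem.Str.len message →
      restoreFind message w start
        = ((PySem.List.pyRange start (PySem.Str.len message - PySem.Str.len w + 1) 1).filter
            (pvQ message w)).map (fun i => (i, i + PySem.Str.len w)) by
    exact fun start h0 h1 => H _ start le_rfl h0 h1
  intro m
  induction m with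
  | zero =>
    intro start hm h0 h1
    omega
  | succ m ih =>
    intro start hm h0 h1
    have hk : start.toNat ≤ message.toList.length := by
      rw [PySem.Str.len_eq] at h1; omega
    have hcast : ((start.toNat : Nat) : Int) = start := Int.toNat_of_nonneg h0
    have hi : PySem.Str.findFrom message w start
        = PySem.Chars.findFrom message.toList w.toList ((start.toNat : Nat) : Int) := by
      rw [hcast, PySem.Str.findFrom_eq]
    rw [restoreFind, dif_pos ⟨h0, h1⟩]
    by_cases h : PySem.Str.findFrom message w start = -1
    · rw [dif_pos h]
      rw [hi] at h
      have hno : ¬ w.toList <:+: message.toList.drop start.toNat :=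
        (PySem.Chars.findFrom_natCast_eq_neg_one_iff message.toList w.toList start.toNat hk).mp h
      symm
      rw [List.map_eq_nil_iff, List.filter_eq_nil_iff]
      intro x hx hq
      rcases PySem.List.mem_pyRange_one.mp hx with ⟨hx1, hx2⟩
      have hpre : w.toList <+: (message.toList.drop start.toNat).drop (x.toNat - start.toNat) := by
        rw [List.drop_drop]
        have : start.toNat + (x.toNat - start.toNat) = x.toNat := by omega
        rw [this]
        exact (PySem.Chars.startswith_iff _ _).mp hq
      exact hno ((PySem.Chars.isIn_iff_infix _ _).mp
        ((PySem.Chars.exists_prefix_drop_iff_isIn _ _).mp ⟨_, hpre⟩))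
    · rw [dif_neg h]
      have hb := pv_findFrom_bounds message w start h0 h1 h
      set i := PySem.Str.findFrom message w start with hidef
      have hne' : PySem.Chars.findFrom message.toList w.toList ((start.toNat : Nat) : Int) ≠ -1 := by
        rw [← hi]; exact h
      have hspec := PySem.Chars.findFrom_natCast_spec message.toList w.toList start.toNat hk hne'
      rw [← hi] at hspec
      obtain ⟨hge, hpre, hmin⟩ := hspec
      have hilen : i + PySem.Str.len w ≤ PySem.Str.len message := by
        have := hpre.length_le
        rw [List.length_drop] at this
        rw [PySem.Str.len_eq, PySem.Str.len_eq] at *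
        omega
      have hsplit : PySem.List.pyRange start (PySem.Str.len message - PySem.Str.len w + 1) 1
          = PySem.List.pyRange start i 1 ++ PySem.List.pyRange i (PySem.Str.len message - PySem.Str.len w + 1) 1 :=
        PySem.List.pyRange_one_append start i _ hb.1 (by omega)
      rw [hsplit, List.filter_append]
      have hfilt1 : (PySem.List.pyRange start i 1).filter (pvQ message w) = [] := by
        rw [List.filter_eq_nil_iff]
        intro x hx hq
        rcases PySem.List.mem_pyRange_one.mp hx with ⟨hx1, hx2⟩
        exact hmin x.toNat (by omega) (by omega) ((PySem.Chars.startswith_iff _ _).mp hq)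
      have hcons : PySem.List.pyRange i (PySem.Str.len message - PySem.Str.len w + 1) 1
          = i :: PySem.List.pyRange (i + 1) (PySem.Str.len message - PySem.Str.len w + 1) 1 :=
        PySem.List.pyRange_one_cons (by omega)
      have hqi : pvQ message w i = true := by
        unfold pvQ
        exact (PySem.Chars.startswith_iff _ _).mpr hpre
      rw [hfilt1, hcons, List.nil_append, List.filter_cons, hqi]
      rw [if_pos rfl, List.map_cons]
      congr 1
      exact ih (i + 1) (by omega) (by omega) (by omega)

-- B's match-collection loop produces exactly pvM
theorem pv_B_list (dictionary : List String) (message : String) :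
    ((PySem.List.dedup dictionary).foldl (fun acc w =>
      if w == "" then acc else acc ++ restoreFind message w 0) [])
    = pvM dictionary message := by
  have hstep : ∀ (acc : List (Int × Int)) (w : String), w ∈ PySem.List.dedup dictionary →
      (if w == "" then acc else acc ++ restoreFind message w 0) = acc ++ pvBlock message w := by
    intro acc w _
    unfold pvBlock
    by_cases hw : w = ""
    · rw [if_pos (by simpa using hw), if_pos hw, List.append_nil]
    · rw [if_neg (by simpa using hw), if_neg hw,
        pv_restoreFind message w hw 0 le_rfl (by rw [PySem.Str.len_eq]; omega)]
  rw [PySem.List.foldl_congr_mem _ _ _ [] hstep]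
  rw [PySem.List.foldl_append_eq_flatMap]
  rfl

-- ===== VERDICT (by name: the statement is the Claim_ definition above) =====
theorem restore_spec : Claim_equal_restore := by
  intro dictionary message _
  show restore dictionary message = restore_alt dictionary message
  simp only [restore, restore_alt]
  rw [PySem.List.foldl_prod_mk (fun (d : PySem.Dict String Bool) w => d.insert w true)
      (fun m w => if PySem.Str.len w > m then PySem.Str.len w else m) dictionary PySem.Dict.empty 0]
  have hA := pv_A_list dictionary message
  have hB := pv_B_list dictionary message
  rw [show dictionary.foldl (fun m w => if PySem.Str.len w > m then PySem.Str.len w else m) 0 = pvMaxL dictionary from rfl]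
  rw [hA, hB]
  rw [pv_sorted2_eq (pvM dictionary message) (pvC dictionary message) (pv_nodup_M dictionary message)
      (((List.perm_ext_iff_of_nodup (pv_nodup_C dictionary message) (pv_nodup_M dictionary message)).mpr
        (fun p => (pv_mem_iff dictionary message p).symm)))
      (pv_pairwise_C dictionary message)]
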